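-- pv_equiv track=rewrite | github.com/astrofra/workshop-digital-curiosity | www/tests/api_smoke_test.py | find_unknown_code
-- ===== SOURCE A (Python) =====
-- def find_unknown_code(codes):
--     existing = set(codes)
--
--     for first in "ABCDEFGHIJKLMNOPQRSTUVWXYZ":
--         for second in "ABCDEFGHIJKLMNOPQRSTUVWXYZ":
--             for third in "ABCDEFGHIJKLMNOPQRSTUVWXYZ":
--                 for fourth in "ABCDEFGHIJKLMNOPQRSTUVWXYZ":
--                     candidate = f"{first}{second}{third}{fourth}"
--                     if candidate not in existing:
--                         return candidate
--
--     raise RuntimeError("No free participant code available for test.")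
-- ===== SOURCE B (Python) =====
-- def find_unknown_code(codes):
--     A = "ABCDEFGHIJKLMNOPQRSTUVWXYZ"
--     # encode every valid 4-letter uppercase code into its base-26 index
--     idxs = []
--     for c in codes:
--         if len(c) == 4 and all(ch in A for ch in c):
--             n = 0
--             for ch in c:
--                 n = n * 26 + (ord(ch) - 65)
--             idxs.append(n)
--     # scan the sorted, deduplicated indices for the first gap
--     expected = 0
--     for n in sorted(set(idxs)):
--         if n > expected:
--             break
--         expected = n + 1
--     if expected >= 26 ** 4:
--         raise RuntimeError("No free participant code available for test.")
--     s = ""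
--     for _ in range(4):
--         s = A[expected % 26] + s
--         expected //= 26
--     return s
-- ===== Notes on version B (the rewrite author's own statement) =====
-- stated objective: alternative
-- what changed: Replaces candidate-by-candidate probing of the 26^4 code space against a hash set with a sort-then-gap scan: every valid 4-letter uppercase code is encoded as a base-26 integer, the indices are sorted and deduplicated, the first gap in the sorted sequence gives the smallest free index, which is decoded back to a string.
import Mathlib
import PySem

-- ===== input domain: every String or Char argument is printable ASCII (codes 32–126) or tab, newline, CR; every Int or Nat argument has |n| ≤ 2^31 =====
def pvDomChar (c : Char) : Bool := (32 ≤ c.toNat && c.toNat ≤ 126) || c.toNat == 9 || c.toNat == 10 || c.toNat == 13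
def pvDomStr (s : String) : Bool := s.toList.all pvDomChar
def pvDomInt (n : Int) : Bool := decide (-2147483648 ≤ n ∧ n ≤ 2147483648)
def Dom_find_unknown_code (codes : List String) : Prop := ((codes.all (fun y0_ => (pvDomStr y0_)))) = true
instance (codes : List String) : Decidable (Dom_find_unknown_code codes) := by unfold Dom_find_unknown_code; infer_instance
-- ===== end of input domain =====

-- B replaces A's candidate-by-candidate probing of the 26^4 code space with a
-- sort-then-gap scan over the base-26 encodings of the existing valid codes
-- (alternative algorithm; equivalence of RETURN values on Pre_).

-- ===== PORT A =====
def pvAlphaA : List Char := "ABCDEFGHIJKLMNOPQRSTUVWXYZ".toList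

def find_unknown_code (codes : List String) : String :=
  let existing : PySem.Set String := PySem.Set.ofList codes
  match pvAlphaA.findSome? (fun a =>
        pvAlphaA.findSome? (fun b =>
          pvAlphaA.findSome? (fun c =>
            pvAlphaA.findSome? (fun d =>
              let candidate := String.ofList [a, b, c, d]
              if PySem.Set.contains existing candidate then none else some candidate)))) with
  | some s => s
  | none => ""   -- Python raises RuntimeError here; excluded by Pre_

-- ===== PORT B =====
def pvAlphaB : List Char := "ABCDEFGHIJKLMNOPQRSTUVWXYZ".toList

-- base-26 index of a valid 4-letter uppercase code, none otherwise
def pvEncode? (s : String) : Option Nat :=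
  let cs := s.toList
  if cs.length == 4 && cs.all (fun ch => pvAlphaB.contains ch) then
    some (cs.foldl (fun n ch => n * 26 + (ch.toNat - 65)) 0)
  else none

-- scan a sorted deduplicated list for the first gap
def pvGapScan : List Nat → Nat → Nat
  | [], e => e
  | n :: rest, e => if e < n then e else pvGapScan rest (n + 1)

-- decode an index back into a 4-letter string (index e % 26 is always < 26)
def pvDecode4 : Nat → Nat → String → String
  | 0, _, s => s
  | k + 1, e, s => pvDecode4 k (e / 26) (String.ofList (pvAlphaB.getD (e % 26) 'A' :: s.toList))

def find_unknown_code_alt (codes : List String) : String :=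
  let idxs := codes.filterMap pvEncode?
  let srt := PySem.List.sorted (PySem.Set.ofList idxs) (fun x => x) false
  let expected := pvGapScan srt 0
  if 456976 ≤ expected then ""   -- Python raises RuntimeError here; excluded by Pre_
  else pvDecode4 4 expected ""

-- ===== PRECONDITION & SPEC =====
-- Pre_'s own copies of B-side helpers (Pre_ may not reach the ports)
def pvPreAlpha : List Char := "ABCDEFGHIJKLMNOPQRSTUVWXYZ".toList
def pvPreEnc? (s : String) : Option Nat :=
  let cs := s.toList
  if cs.length == 4 && cs.all (fun ch => pvPreAlpha.contains ch) then
    some (cs.foldl (fun n ch => n * 26 + (ch.toNat - 65)) 0)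
  else none

-- A raises (RuntimeError) exactly when every one of the 26^4 uppercase 4-letter
-- codes already occurs in codes; Pre_ excludes exactly that case.
def Pre_find_unknown_code (codes : List String) : Prop :=
  (PySem.List.dedup (codes.filterMap pvPreEnc?)).length < 456976
instance (codes : List String) : Decidable (Pre_find_unknown_code codes) := by
  unfold Pre_find_unknown_code; infer_instance

def pvWitness_find_unknown_code : List String := ["ABCD", "xy"]

def Spec_find_unknown_code (codes : List String) (out : String) : Prop := out = find_unknown_code_alt codes
instance (codes : List String) (out : String) : Decidable (Spec_find_unknown_code codes out) := by unfold Spec_find_unknown_code; infer_instance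

-- ===== CLAIM (what is proved, stated in full; the proofs are below) =====
def Claim_equal_find_unknown_code : Prop := ∀ (codes : List String), Dom_find_unknown_code codes → Pre_find_unknown_code codes → Spec_find_unknown_code codes (find_unknown_code codes)

-- ===== LEMMAS AND PROOFS =====

-- canonical 4-letter string of an index n < 456976
def pvChr (i : Nat) : Char := Char.ofNat (65 + i)

def pvSFor (n : Nat) : String :=
  String.ofList [pvChr (n / 17576), pvChr (n / 676 % 26), pvChr (n / 26 % 26), pvChr (n % 26)]

theorem pv_alpha_eq : pvAlphaA = (List.range 26).map pvChr := by
  decide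

def pvF (codes : List String) (a b c d : Nat) : Option String :=
  if (PySem.Set.ofList codes).contains (String.ofList [pvChr a, pvChr b, pvChr c, pvChr d]) = true then none
  else some (String.ofList [pvChr a, pvChr b, pvChr c, pvChr d])

theorem pvF_fold (codes : List String) (a b c d : Nat) :
    (if (PySem.Set.ofList codes).contains (String.ofList [pvChr a, pvChr b, pvChr c, pvChr d]) = true
     then (none : Option String)
     else some (String.ofList [pvChr a, pvChr b, pvChr c, pvChr d])) = pvF codes a b c d := rfl

theorem pvSFor_fold (codes : List String) (n : Nat) :
    (if (PySem.Set.ofList codes).contains (pvSFor n) = true then (none : Option String)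
     else some (pvSFor n)) = pvF codes (n / 17576) (n / 676 % 26) (n / 26 % 26) (n % 26) := rfl

theorem pv_findSome?_congr {α β : Type} (l : List α) (f g : α → Option β)
    (h : ∀ x ∈ l, f x = g x) : l.findSome? f = l.findSome? g := by
  induction l with
  | nil => rfl
  | cons a t ih =>
    simp only [List.findSome?_cons, h a (List.mem_cons_self ..)]
    cases g a with
    | none => exact ih (fun x hx => h x (List.mem_cons_of_mem _ hx))
    | some b => rfl

theorem pv_range_mul_findSome? {α : Type} (m k : Nat) (g : Nat → Option α) :
    (List.range (m * k)).findSome? g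
      = (List.range m).findSome? (fun a => (List.range k).findSome? (fun b => g (a * k + b))) := by
  induction m with
  | zero => simp
  | succ m ih =>
    rw [List.range_succ, List.findSome?_append, ← ih]
    have : (m + 1) * k = m * k + k := by ring
    rw [this, List.range_add, List.findSome?_append, List.findSome?_map]
    simp only [List.findSome?_cons, List.findSome?_nil]
    have hco : (g ∘ fun x => m * k + x) = (fun b => g (m * k + b)) := rfl
    rw [hco]
    cases List.findSome? (fun b => g (m * k + b)) (List.range k) <;> rfl

theorem pv_range_pair_findSome? {α : Type} (m k : Nat) (hk : 0 < k) (G : Nat → Nat → Option α) :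
    (List.range m).findSome? (fun a => (List.range k).findSome? (fun b => G a b))
      = (List.range (m * k)).findSome? (fun n => G (n / k) (n % k)) := by
  rw [pv_range_mul_findSome?]
  apply pv_findSome?_congr
  intro a ha
  apply pv_findSome?_congr
  intro b hb
  rw [List.mem_range] at ha hb
  have h1 : (a * k + b) / k = a := by
    rw [Nat.mul_comm, Nat.mul_add_div hk, Nat.div_eq_of_lt hb, Nat.add_zero]
  have h2 : (a * k + b) % k = b := by
    rw [Nat.mul_comm, Nat.mul_add_mod, Nat.mod_eq_of_lt hb]
  rw [h1, h2]

theorem pv_keyF (codes : List String) :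
    List.findSome? (fun a => List.findSome? (fun b => List.findSome? (fun c =>
      List.findSome? (fun d => pvF codes a b c d) (List.range 26)) (List.range 26))
      (List.range 26)) (List.range 26)
      = List.findSome? (fun n => pvF codes (n / 17576) (n / 676 % 26) (n / 26 % 26) (n % 26))
          (List.range 456976) := by
  have s1 : List.findSome? (fun a => List.findSome? (fun b => List.findSome? (fun c =>
      List.findSome? (fun d => pvF codes a b c d) (List.range 26)) (List.range 26))
      (List.range 26)) (List.range 26)
      = List.findSome? (fun a => List.findSome? (fun b =>
          List.findSome? (fun n => pvF codes a b (n / 26) (n % 26)) (List.range (26 * 26)))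
          (List.range 26)) (List.range 26) :=
    pv_findSome?_congr _ _ _ (fun a _ => pv_findSome?_congr _ _ _ (fun b _ =>
      pv_range_pair_findSome? 26 26 (by norm_num) (fun c d => pvF codes a b c d)))
  have s2 : List.findSome? (fun a => List.findSome? (fun b =>
          List.findSome? (fun n => pvF codes a b (n / 26) (n % 26)) (List.range (26 * 26)))
          (List.range 26)) (List.range 26)
      = List.findSome? (fun a =>
          List.findSome? (fun n => pvF codes a (n / (26 * 26)) (n % (26 * 26) / 26) (n % (26 * 26) % 26))
            (List.range (26 * (26 * 26)))) (List.range 26) :=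
    pv_findSome?_congr _ _ _ (fun a _ =>
      pv_range_pair_findSome? 26 (26 * 26) (by norm_num) (fun b m => pvF codes a b (m / 26) (m % 26)))
  have s3 : List.findSome? (fun a =>
          List.findSome? (fun n => pvF codes a (n / (26 * 26)) (n % (26 * 26) / 26) (n % (26 * 26) % 26))
            (List.range (26 * (26 * 26)))) (List.range 26)
      = List.findSome? (fun n => pvF codes (n / (26 * (26 * 26))) (n % (26 * (26 * 26)) / (26 * 26))
          (n % (26 * (26 * 26)) % (26 * 26) / 26) (n % (26 * (26 * 26)) % (26 * 26) % 26))
          (List.range (26 * (26 * (26 * 26)))) :=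
    pv_range_pair_findSome? 26 (26 * (26 * 26)) (by norm_num)
      (fun a m => pvF codes a (m / (26 * 26)) (m % (26 * 26) / 26) (m % (26 * 26) % 26))
  have s4 : List.findSome? (fun n => pvF codes (n / (26 * (26 * 26))) (n % (26 * (26 * 26)) / (26 * 26))
          (n % (26 * (26 * 26)) % (26 * 26) / 26) (n % (26 * (26 * 26)) % (26 * 26) % 26))
          (List.range (26 * (26 * (26 * 26))))
      = List.findSome? (fun n => pvF codes (n / 17576) (n / 676 % 26) (n / 26 % 26) (n % 26))
          (List.range 456976) := by
    rw [show (26 * (26 * (26 * 26))) = 456976 from by norm_num]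
    apply pv_findSome?_congr
    intro n hn
    have e1 : n / (26 * (26 * 26)) = n / 17576 := by norm_num
    have e2 : n % (26 * (26 * 26)) / (26 * 26) = n / 676 % 26 := by omega
    have e3 : n % (26 * (26 * 26)) % (26 * 26) / 26 = n / 26 % 26 := by omega
    have e4 : n % (26 * (26 * 26)) % (26 * 26) % 26 = n % 26 := by omega
    rw [e1, e2, e3, e4]
  exact s1.trans (s2.trans (s3.trans s4))

theorem pv_A_flatten (codes : List String) :
    find_unknown_code codes
      = (((List.range 456976).findSome? (fun n =>
            if PySem.Set.contains (PySem.Set.ofList codes) (pvSFor n) then none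
            else some (pvSFor n)))).getD "" := by
  unfold find_unknown_code
  rw [pv_alpha_eq]
  simp only [List.findSome?_map, Function.comp_def]
  simp only [pvF_fold, pvSFor_fold]
  rw [pv_keyF codes]
  cases List.findSome? (fun n => pvF codes (n / 17576) (n / 676 % 26) (n / 26 % 26) (n % 26))
      (List.range 456976) <;> rfl

theorem pv_chr_facts : ∀ x, x < 26 → (pvAlphaB.contains (pvChr x) = true ∧ (pvChr x).toNat = 65 + x) := by
  decide

theorem pv_alpha_mem_facts' : (pvAlphaB.all fun c => decide (65 ≤ c.toNat) && decide (c.toNat ≤ 90) && decide (pvChr (c.toNat - 65) = c)) = true := by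
  decide

theorem pv_alpha_mem_facts : ∀ c ∈ pvAlphaB, 65 ≤ c.toNat ∧ c.toNat ≤ 90 ∧ pvChr (c.toNat - 65) = c := by
  have h := pv_alpha_mem_facts'
  rw [List.all_eq_true] at h
  intro c hc
  have := h c hc
  simp at this
  exact ⟨this.1.1, this.1.2, this.2⟩

theorem pv_getD_alpha : ∀ x, x < 26 → pvAlphaB.getD x 'A' = pvChr x := by
  decide

theorem pv_encode_sFor (n : Nat) (hn : n < 456976) : pvEncode? (pvSFor n) = some n := by
  have h1 : n / 17576 < 26 := by omega
  have h2 : n / 676 % 26 < 26 := by omega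
  have h3 : n / 26 % 26 < 26 := by omega
  have h4 : n % 26 < 26 := by omega
  obtain ⟨m1, t1⟩ := pv_chr_facts _ h1
  obtain ⟨m2, t2⟩ := pv_chr_facts _ h2
  obtain ⟨m3, t3⟩ := pv_chr_facts _ h3
  obtain ⟨m4, t4⟩ := pv_chr_facts _ h4
  simp only [pvEncode?, pvSFor]
  simp only [String.toList_ofList]
  rw [if_pos (by simp only [List.length_cons, List.length_nil, List.all_cons, List.all_nil, m1, m2, m3, m4, Bool.and_true, Bool.and_self]; rfl)]
  simp only [List.foldl, t1, t2, t3, t4, Option.some_inj]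
  omega

theorem pv_encode_inv (s : String) (m : Nat) (h : pvEncode? s = some m) :
    m < 456976 ∧ s = pvSFor m := by
  simp only [pvEncode?] at h
  split at h
  case isFalse => exact absurd h (by simp)
  case isTrue hc =>
    rw [Bool.and_eq_true] at hc
    obtain ⟨hlen, hall⟩ := hc
    rw [beq_iff_eq] at hlen
    rw [List.all_eq_true] at hall
    match hcs : s.toList, hlen with
    | [c1, c2, c3, c4], _ => ?_
    rw [hcs] at h hall
    simp only [Option.some_inj] at h
    obtain ⟨b1l, b1r, e1⟩ := pv_alpha_mem_facts c1 (by have := hall c1 (by simp); simpa using this)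
    obtain ⟨b2l, b2r, e2⟩ := pv_alpha_mem_facts c2 (by have := hall c2 (by simp); simpa using this)
    obtain ⟨b3l, b3r, e3⟩ := pv_alpha_mem_facts c3 (by have := hall c3 (by simp); simpa using this)
    obtain ⟨b4l, b4r, e4⟩ := pv_alpha_mem_facts c4 (by have := hall c4 (by simp); simpa using this)
    simp only [List.foldl] at h
    have hm : m = ((((c1.toNat - 65) * 26 + (c2.toNat - 65)) * 26 + (c3.toNat - 65)) * 26 + (c4.toNat - 65)) := by
      omega
    constructor
    · omega
    · have hs : s = String.ofList [c1, c2, c3, c4] := by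
        rw [← hcs]; simp
      rw [hs]
      unfold pvSFor
      have d1 : m / 17576 = c1.toNat - 65 := by omega
      have d2 : m / 676 % 26 = c2.toNat - 65 := by omega
      have d3 : m / 26 % 26 = c3.toNat - 65 := by omega
      have d4 : m % 26 = c4.toNat - 65 := by omega
      rw [d1, d2, d3, d4, e1, e2, e3, e4]

theorem pv_decode_sFor (g : Nat) (hg : g < 456976) : pvDecode4 4 g "" = pvSFor g := by
  have h1 : g % 26 < 26 := by omega
  have h2 : g / 26 % 26 < 26 := by omega
  have h3 : g / 26 / 26 % 26 < 26 := by omega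
  have h4 : g / 26 / 26 / 26 % 26 < 26 := by omega
  simp only [pvDecode4]
  rw [pv_getD_alpha _ h1, pv_getD_alpha _ h2, pv_getD_alpha _ h3, pv_getD_alpha _ h4]
  unfold pvSFor
  have e1 : g / 26 / 26 / 26 % 26 = g / 17576 := by omega
  have e2 : g / 26 / 26 % 26 = g / 676 % 26 := by omega
  rw [e1, e2]
  simp

theorem pv_gap_spec (l : List Nat) (e : Nat) (hs : l.Pairwise (· < ·))
    (hge : ∀ x ∈ l, e ≤ x) :
    e ≤ pvGapScan l e ∧ pvGapScan l e ∉ l ∧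
      (∀ m, e ≤ m → m < pvGapScan l e → m ∈ l) := by
  induction l generalizing e with
  | nil => simp [pvGapScan]
  | cons n t ih =>
    have hnt : ∀ x ∈ t, n < x := by
      intro x hx; exact (List.pairwise_cons.mp hs).1 x hx
    simp only [pvGapScan]
    split
    · rename_i hlt
      refine ⟨le_refl e, ?_, ?_⟩
      · intro hmem
        rcases List.mem_cons.mp hmem with h | h
        · omega
        · have := hnt _ h; omega
      · intro m h1 h2; omega
    · rename_i hnlt
      have hen : n = e := le_antisymm (by omega) (hge n (List.mem_cons_self ..))
      have hget : ∀ x ∈ t, e + 1 ≤ x := by intro x hx; have := hnt x hx; omega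
      obtain ⟨h1, h2, h3⟩ := ih (List.pairwise_cons.mp hs).2 (e := n + 1) (by
        intro x hx; have := hnt x hx; omega)
      subst hen
      refine ⟨by omega, ?_, ?_⟩
      · intro hmem
        rcases List.mem_cons.mp hmem with h | h
        · omega
        · exact h2 h
      · intro m hm1 hm2
        by_cases hme : m = n
        · subst hme; exact List.mem_cons_self ..
        · exact List.mem_cons_of_mem _ (h3 m (by omega) hm2)

theorem pv_find?_range (N g : Nat) (p : Nat → Bool) (hg : g < N) (hpg : p g = true)
    (hmin : ∀ m, m < g → p m = false) : (List.range N).find? p = some g := by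
  induction N with
  | zero => omega
  | succ N ih =>
    rw [List.range_succ, List.find?_append]
    by_cases h : g < N
    · rw [ih h]; rfl
    · have hgN : g = N := by omega
      subst hgN
      have hnone : (List.range g).find? p = none := by
        rw [List.find?_eq_none]
        intro x hx
        rw [List.mem_range] at hx
        simp [hmin x hx]
      rw [hnone]
      simp [hpg]

theorem pv_findSome?_if {α β : Type} (l : List α) (p : α → Bool) (f : α → β) :
    l.findSome? (fun x => if p x = true then none else some (f x))
      = (l.find? (fun x => !p x)).map f := by
  induction l with
  | nil => rfl
  | cons a t ih =>
    simp only [List.findSome?_cons, List.find?_cons]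
    cases hpa : p a with
    | true => simpa using ih
    | false => simp

theorem pv_pre_enc_eq : pvPreEnc? = pvEncode? := rfl

-- ===== VERDICT (by name: the statement is the Claim_ definition above) =====
theorem find_unknown_code_spec : Claim_equal_find_unknown_code := by
  intro codes _ hpre
  unfold Spec_find_unknown_code
  have hbridge : ∀ n, n < 456976 →
      ((PySem.Set.ofList codes).contains (pvSFor n) = true ↔ n ∈ codes.filterMap pvEncode?) := by
    intro n hn
    rw [PySem.Set.contains_iff, PySem.Set.mem_ofList]
    constructor
    · intro h
      exact List.mem_filterMap.mpr ⟨pvSFor n, h, pv_encode_sFor n hn⟩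
    · intro h
      rcases List.mem_filterMap.mp h with ⟨s, hs, he⟩
      have h2 := (pv_encode_inv s n he).2
      rw [← h2]; exact hs
  have hsort : (PySem.List.sorted (PySem.Set.ofList (codes.filterMap pvEncode?)) (fun x => x) false).Pairwise (· < ·) :=
    PySem.List.sorted_ofList_pairwise_lt _
  have hmemsrt : ∀ x : Nat,
      x ∈ PySem.List.sorted (PySem.Set.ofList (codes.filterMap pvEncode?)) (fun x => x) false
        ↔ x ∈ codes.filterMap pvEncode? := by
    intro x; rw [PySem.List.mem_sorted, PySem.Set.mem_ofList]
  obtain ⟨hge, hnm, hbelow⟩ :=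
    pv_gap_spec (PySem.List.sorted (PySem.Set.ofList (codes.filterMap pvEncode?)) (fun x => x) false)
      0 hsort (fun x _ => Nat.zero_le x)
  set g := pvGapScan (PySem.List.sorted (PySem.Set.ofList (codes.filterMap pvEncode?)) (fun x => x) false) 0 with hg
  have hgnotE : g ∉ codes.filterMap pvEncode? := fun h => hnm ((hmemsrt g).mpr h)
  have hgbelowE : ∀ m, m < g → m ∈ codes.filterMap pvEncode? :=
    fun m hm => (hmemsrt m).mp (hbelow m (Nat.zero_le m) hm)
  have hglt : g < 456976 := by
    by_contra hge'
    rw [Nat.not_lt] at hge'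
    have hsub : ∀ n ∈ List.range 456976, n ∈ PySem.List.dedup (codes.filterMap pvPreEnc?) := by
      intro n hn
      rw [List.mem_range] at hn
      rw [pv_pre_enc_eq]
      exact (PySem.List.mem_dedup _ _).mpr (hgbelowE n (by omega))
    have hcard : (List.range 456976).toFinset ⊆ (PySem.List.dedup (codes.filterMap pvPreEnc?)).toFinset := by
      intro x hx
      rw [List.mem_toFinset] at hx ⊢
      exact hsub x hx
    have h1 := Finset.card_le_card hcard
    rw [List.toFinset_card_of_nodup List.nodup_range,
        List.toFinset_card_of_nodup (PySem.List.nodup_dedup _), List.length_range] at h1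
    unfold Pre_find_unknown_code at hpre
    omega
  rw [pv_A_flatten, pv_findSome?_if]
  have hfind : (List.range 456976).find? (fun n => !(PySem.Set.ofList codes).contains (pvSFor n)) = some g := by
    apply pv_find?_range _ _ _ hglt
    · cases hcc : (PySem.Set.ofList codes).contains (pvSFor g) with
      | false => rfl
      | true => exact absurd ((hbridge g hglt).mp hcc) hgnotE
    · intro m hm
      have hc : (PySem.Set.ofList codes).contains (pvSFor m) = true :=
        (hbridge m (by omega)).mpr (hgbelowE m hm)
      simp only [hc, Bool.not_true]
  rw [hfind]
  simp only [Option.map_some, Option.getD_some]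
  show _ = find_unknown_code_alt codes
  unfold find_unknown_code_alt
  simp only []
  rw [← hg]
  rw [if_neg (by omega)]
  rw [pv_decode_sFor g hglt]
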